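-- pv_equiv track=rewrite | github.com/urianchang/Algorithms | AdventOfCode/2018/8_memory_maneuver/code.py | parse
-- ===== SOURCE A (Python) =====
-- def parse(data):
--     children, metas = data[:2]
--     data = data[2:]
--     meta_totals = 0
--     child_nodes = []
--
--     for i in range(children):
--         meta_total, node_value, data = parse(data)
--         meta_totals += meta_total
--         child_nodes.append(node_value)
--
--     meta_totals += sum(data[:metas])
--
--     if children == 0:
--         return (
--             meta_totals,
--             sum(data[:metas]),
--             data[metas:]
--         )
--     else:
--         return (
--             meta_totals,
--             sum(
--                 child_nodes[i - 1] for i in data[:metas]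
--                 if i > 0 and i <= len(child_nodes)
--             ),
--             data[metas:]
--         )
-- ===== SOURCE B (Python) =====
-- def parse(data):
--     # Explicit-stack reimplementation: one frame per open node instead of recursion.
--     # Frame: [children, metas, remaining_children, subtree_meta_acc, child_values]
--     c, m = data[0], data[1]
--     data = data[2:]
--     stack = [[c, m, c, 0, []]]
--     while True:
--         frame = stack[-1]
--         if frame[2] > 0:
--             frame[2] -= 1
--             c, m = data[0], data[1]
--             data = data[2:]
--             stack.append([c, m, c, 0, []])
--             continue
--         children, metas, _, meta_acc, child_values = frame
--         md = data[:metas]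
--         data = data[metas:]
--         s = sum(md)
--         total = meta_acc + s
--         if children == 0:
--             value = s
--         else:
--             value = sum(child_values[i - 1] for i in md
--                         if 0 < i <= len(child_values))
--         stack.pop()
--         if not stack:
--             return (total, value, data)
--         parent = stack[-1]
--         parent[3] += total
--         parent[4].append(value)
-- ===== Notes on version B (the rewrite author's own statement) =====
-- stated objective: alternative
-- what changed: Replaced A's recursion (one nested call per child, with per-node slicing) by a single iterative loop over an explicit stack of frames, each frame carrying remaining-children, the running subtree-metadata total and the collected child values.
import Mathlib
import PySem

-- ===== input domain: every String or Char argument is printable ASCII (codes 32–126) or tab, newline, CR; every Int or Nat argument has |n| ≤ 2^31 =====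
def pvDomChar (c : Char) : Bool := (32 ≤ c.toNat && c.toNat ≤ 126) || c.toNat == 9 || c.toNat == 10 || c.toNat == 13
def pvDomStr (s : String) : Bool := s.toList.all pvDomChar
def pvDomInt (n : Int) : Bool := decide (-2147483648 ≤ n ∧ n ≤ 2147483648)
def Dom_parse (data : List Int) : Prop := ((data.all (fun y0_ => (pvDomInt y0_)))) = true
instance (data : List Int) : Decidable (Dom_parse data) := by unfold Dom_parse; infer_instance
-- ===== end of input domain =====

-- B replaces A's recursion-with-slicing by an explicit stack of frames over the same list; same return value.

-- shared helper: sum(child_nodes[i-1] for i in md if 0 < i <= len(child_nodes)) — the comprehension both Pythons contain verbatim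
def childSum (cns : List Int) (md : List Int) : Int :=
  md.foldl (fun acc i => if 0 < i ∧ i ≤ (cns.length : Int) then acc + cns.getD (i - 1).toNat 0 else acc) 0

-- termination helper: data[m:] is never longer than data
theorem length_sliceFrom_le (d : List Int) (m : Int) :
    (PySem.List.slice d (some m) none).length ≤ d.length := by
  rw [PySem.List.slice_some_none]; simp

-- ===== PORT A =====
-- A raises (ValueError) when a node header has fewer than 2 elements; the port signals that with none and
-- `parse` returns a dummy there (outside Pre_parse). The subtype only carries the length bound for termination.
mutual
def parseA : (data : List Int) → Option (Int × Int × {r : List Int // r.length ≤ data.length})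
  | c :: m :: rest =>
    match childLoopA c.toNat rest with
    | none => none
    | some (mt, cns, ⟨d, hd⟩) =>
      let md := PySem.List.slice d none (some m)
      if c == 0 then
        some (mt + md.sum, md.sum, ⟨PySem.List.slice d (some m) none, by
          have h1 := length_sliceFrom_le d m; simp only [List.length_cons]; omega⟩)
      else
        some (mt + md.sum, childSum cns md, ⟨PySem.List.slice d (some m) none, by
          have h1 := length_sliceFrom_le d m; simp only [List.length_cons]; omega⟩)
  | _ => none
termination_by data => (data.length, 0)
decreasing_by apply Prod.Lex.left; simp

def childLoopA : (n : Nat) → (data : List Int) → Option (Int × List Int × {r : List Int // r.length ≤ data.length})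
  | 0, data => some (0, [], ⟨data, le_refl _⟩)
  | n + 1, data =>
    match parseA data with
    | none => none
    | some (mt, v, ⟨d, hd⟩) =>
      match childLoopA n d with
      | none => none
      | some (mt2, vs, ⟨d2, hd2⟩) => some (mt + mt2, v :: vs, ⟨d2, le_trans hd2 hd⟩)
termination_by n data => (data.length, n + 1)
decreasing_by
  · apply Prod.Lex.right; omega
  · rcases lt_or_eq_of_le hd with h | h
    · exact Prod.Lex.left _ _ h
    · rw [h]; exact Prod.Lex.right _ (by omega)
end

def parse (data : List Int) : Int × Int × List Int :=
  match parseA data with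
  | some (t, v, r) => (t, v, r.val)
  | none => (0, 0, [])

-- ===== PORT B =====
-- frame = (children, metas, remaining_children, subtree_meta_acc, child_values); Python's stack[-1] is the list head
def bLoop : (stack : List (Int × Int × Int × Int × List Int)) → (data : List Int) → Option (Int × Int × List Int)
  | [], _ => none
  | (c, m, rem, acc, vals) :: rest, data =>
    if 0 < rem then
      match data with
      | c' :: m' :: d2 => bLoop ((c', m', c', 0, []) :: (c, m, rem - 1, acc, vals) :: rest) d2
      | _ => none
    else
      let md := PySem.List.slice data none (some m)
      let d2 := PySem.List.slice data (some m) none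
      let s := md.sum
      let total := acc + s
      let value := if c == 0 then s else childSum vals md
      match rest with
      | [] => some (total, value, d2)
      | (pc, pm, prem, pacc, pvals) :: rr =>
        bLoop ((pc, pm, prem, pacc + total, pvals ++ [value]) :: rr) d2
termination_by stack data => data.length + stack.length
decreasing_by
  · simp only [List.length_cons]; omega
  · have h1 := length_sliceFrom_le data m; simp only [List.length_cons]; omega

def parse_alt (data : List Int) : Int × Int × List Int :=
  match data with
  | c :: m :: rest => (bLoop [(c, m, c, 0, [])] rest).getD (0, 0, [])
  | _ => (0, 0, [])

-- ===== PRECONDITION & SPEC =====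
-- Tree-shape check only (it computes no sums or values): Pre_parse holds exactly when every node-header
-- read finds at least 2 elements, i.e. exactly when the Python A returns instead of raising ValueError.
-- The Nat budget is only a structural-recursion bound; data.length + 2 always suffices, since the check
-- consumes two elements per node and takes at most one extra step per finished node.
def shapeF : (budget : Nat) → (pending : Nat) → List Int → Option (List Int)
  | _, 0, d => some d
  | b + 1, n + 1, c :: m :: rest =>
    match shapeF b c.toNat rest with
    | none => none
    | some r => shapeF b n (PySem.List.slice r (some m) none)
  | 0, _ + 1, _ => none
  | _ + 1, _ + 1, _ => none

def Pre_parse (data : List Int) : Prop := (shapeF (data.length + 2) 1 data).isSome = true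
instance (data : List Int) : Decidable (Pre_parse data) := by unfold Pre_parse; infer_instance
def pvWitness_parse : List Int := [2, 3, 0, 3, 10, 11, 12, 1, 1, 0, 1, 99, 2, 1, 1, 2]

def Spec_parse (data : List Int) (out : Int × Int × List Int) : Prop := out = parse_alt data
instance (data : List Int) (out : Int × Int × List Int) : Decidable (Spec_parse data out) := by unfold Spec_parse; infer_instance

-- ===== CLAIM (what is proved, stated in full; the proofs are below) =====
def Claim_equal_parse : Prop := ∀ (data : List Int), Dom_parse data → Pre_parse data → Spec_parse data (parse data)

-- ===== LEMMAS AND PROOFS =====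

-- proof-layer helpers: childLoopA with the length proof stripped, and the "finish this frame" continuation of bLoop
def stripCL (k : Nat) (data : List Int) : Option (Int × List Int × List Int) :=
  (childLoopA k data).map (fun x => (x.1, x.2.1, x.2.2.val))

def frameFinish (c m acc : Int) (vals : List Int)
    (rest : List (Int × Int × Int × Int × List Int)) :
    Option (Int × List Int × List Int) → Option (Int × Int × List Int)
  | none => none
  | some (t, cvs, d') =>
    let md := PySem.List.slice d' none (some m)
    let d2 := PySem.List.slice d' (some m) none
    let s := md.sum
    let total := acc + t + s
    let value := if c == 0 then s else childSum (vals ++ cvs) md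
    match rest with
    | [] => some (total, value, d2)
    | (pc, pm, prem, pacc, pvals) :: rr =>
      bLoop ((pc, pm, prem, pacc + total, pvals ++ [value]) :: rr) d2

theorem sim_pop (data : List Int) (c m rem acc : Int) (vals : List Int)
    (rest : List (Int × Int × Int × Int × List Int)) (h : ¬ 0 < rem) :
    bLoop ((c, m, rem, acc, vals) :: rest) data
      = frameFinish c m acc vals rest (stripCL rem.toNat data) := by
  have h0 : rem.toNat = 0 := by omega
  rw [h0]
  conv_lhs => rw [bLoop.eq_def]
  simp only [if_neg h]
  cases rest with
  | nil => simp [stripCL, childLoopA, frameFinish]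
  | cons p rr =>
    obtain ⟨pc, pm, prem, pacc, pvals⟩ := p
    simp [stripCL, childLoopA, frameFinish]


theorem frameFinish_shift (c m acc d v1 : Int) (vals : List Int)
    (rest : List (Int × Int × Int × Int × List Int))
    (r : Option (Int × List Int × List Int)) :
    frameFinish c m (acc + d) (vals ++ [v1]) rest r
      = frameFinish c m acc vals rest (r.map (fun x => (d + x.1, v1 :: x.2.1, x.2.2))) := by
  cases r with
  | none => rfl
  | some x =>
    obtain ⟨t2, cvs2, e3⟩ := x
    cases rest with
    | nil => simp [frameFinish, add_assoc]
    | cons p rr =>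
      obtain ⟨pc, pm, prem, pacc, pvals⟩ := p
      simp [frameFinish, add_assoc]

theorem stripCL_succ (k : Nat) (c' m' : Int) (d2 : List Int) (t1 : Int) (cvs1 e1 : List Int)
    (he1 : e1.length ≤ d2.length) (h2 : childLoopA c'.toNat d2 = some (t1, cvs1, ⟨e1, he1⟩)) :
    stripCL (k + 1) (c' :: m' :: d2)
      = (stripCL k (PySem.List.slice e1 (some m') none)).map
          (fun x => (t1 + (PySem.List.slice e1 none (some m')).sum + x.1,
                     (if c' == 0 then (PySem.List.slice e1 none (some m')).sum
                      else childSum cvs1 (PySem.List.slice e1 none (some m'))) :: x.2.1,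
                     x.2.2)) := by
  unfold stripCL
  rw [childLoopA]
  rw [parseA]
  rw [h2]
  by_cases hc : c' == 0 <;>
    cases h3 : childLoopA k (PySem.List.slice e1 (some m') none) <;>
      simp [hc, h3]

theorem bLoop_sim : ∀ (N : Nat) (data : List Int), data.length ≤ N →
    ∀ (c m rem acc : Int) (vals : List Int)
      (rest : List (Int × Int × Int × Int × List Int)),
    bLoop ((c, m, rem, acc, vals) :: rest) data
      = frameFinish c m acc vals rest (stripCL rem.toNat data) := by
  intro N
  induction N with
  | zero =>
    intro data hlen c m rem acc vals rest
    have hdata : data = [] := List.eq_nil_of_length_eq_zero (Nat.le_zero.mp hlen)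
    subst hdata
    by_cases h : 0 < rem
    · have h1 : rem.toNat = (rem - 1).toNat + 1 := by omega
      rw [h1]
      simp [bLoop, h, stripCL, childLoopA, parseA, frameFinish]
    · exact sim_pop _ _ _ _ _ _ _ h
  | succ n ih =>
    intro data hlen c m rem acc vals rest
    by_cases h : 0 < rem
    · have h1 : rem.toNat = (rem - 1).toNat + 1 := by omega
      rw [h1]
      match data with
      | [] => simp [bLoop, h, stripCL, childLoopA, parseA, frameFinish]
      | [x] => simp [bLoop, h, stripCL, childLoopA, parseA, frameFinish]
      | c' :: m' :: d2 =>
        have hd2 : d2.length ≤ n := by simp at hlen; omega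
        rw [bLoop]
        simp only [if_pos h]
        rw [ih d2 hd2 c' m' c' 0 [] ((c, m, rem - 1, acc, vals) :: rest)]
        -- unfold one step of childLoopA on the right
        cases h2 : childLoopA c'.toNat d2 with
        | none =>
          simp [stripCL, childLoopA, parseA, h2, frameFinish]
        | some v1 =>
          obtain ⟨t1, cvs1, e1, he1⟩ := v1
          have hstrip1 : stripCL c'.toNat d2 = some (t1, cvs1, e1) := by
            simp [stripCL, h2]
          rw [hstrip1]
          have he2len : (PySem.List.slice e1 (some m') none).length ≤ n :=
            le_trans (le_trans (length_sliceFrom_le e1 m') he1) hd2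
          rw [stripCL_succ (rem - 1).toNat c' m' d2 t1 cvs1 e1 he1 h2]
          -- left side: finish the child frame, then continue the parent frame via ih
          rw [frameFinish]
          rw [ih _ he2len]
          rw [show (0 : Int) + t1 + (PySem.List.slice e1 none (some m')).sum
                = t1 + (PySem.List.slice e1 none (some m')).sum by ring] at *
          rw [frameFinish_shift]
          simp
    · exact sim_pop _ _ _ _ _ _ _ h

theorem parse_total_eq : ∀ (data : List Int), parse data = parse_alt data := by
  intro data
  match data with
  | [] => simp [parse, parse_alt, parseA]
  | [x] => simp [parse, parse_alt, parseA]
  | c :: m :: rest =>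
    have hpa : parse_alt (c :: m :: rest) = (bLoop [(c, m, c, 0, [])] rest).getD (0, 0, []) := rfl
    rw [hpa]
    unfold parse
    rw [bLoop_sim rest.length rest (le_refl _)]
    rw [parseA]
    cases h2 : childLoopA c.toNat rest with
    | none => simp [stripCL, h2, frameFinish]
    | some v =>
      obtain ⟨t, cvs, e, he⟩ := v
      have hs : stripCL c.toNat rest = some (t, cvs, e) := by simp [stripCL, h2]
      rw [hs]
      by_cases hc : c == 0 <;> simp [hc, frameFinish]

-- ===== VERDICT (by name: the statement is the Claim_ definition above) =====
theorem parse_spec : Claim_equal_parse := by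
  intro data _ _
  unfold Spec_parse
  exact parse_total_eq data
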